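-- pv_equiv track=rewrite | github.com/AleksejKorobac1/STT1 | STTWEB/STTWEBMAIN/util.py | exclude_from_results
-- ===== SOURCE A (Python) =====
-- def exclude_from_results(results, exclude):
--     for exclusion in exclude:
--         new_results = []
--         for result in results:
--             if exclusion not in result[0].lower():
--                 new_results.append(result)
--         results = new_results
--     return results
-- ===== SOURCE B (Python) =====
-- def exclude_from_results(results, exclude):
--     # Stage 1: one pass computing, per result, whether its lowered key hits any exclusion.
--     bad = [any(e in r[0].lower() for e in exclude) for r in results]
--     # Stage 2: select the results whose mask entry is False.
--     return [r for r, b in zip(results, bad) if not b]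
-- ===== Notes on version B (the rewrite author's own statement) =====
-- stated objective: alternative
-- what changed: Replaces A's per-exclusion rebuilds of the whole result list by a two-stage mask-and-select: one pass computes a boolean hit mask (lowering each key once, short-circuiting over exclusions), a second pass selects the unmasked results.
import Mathlib
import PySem

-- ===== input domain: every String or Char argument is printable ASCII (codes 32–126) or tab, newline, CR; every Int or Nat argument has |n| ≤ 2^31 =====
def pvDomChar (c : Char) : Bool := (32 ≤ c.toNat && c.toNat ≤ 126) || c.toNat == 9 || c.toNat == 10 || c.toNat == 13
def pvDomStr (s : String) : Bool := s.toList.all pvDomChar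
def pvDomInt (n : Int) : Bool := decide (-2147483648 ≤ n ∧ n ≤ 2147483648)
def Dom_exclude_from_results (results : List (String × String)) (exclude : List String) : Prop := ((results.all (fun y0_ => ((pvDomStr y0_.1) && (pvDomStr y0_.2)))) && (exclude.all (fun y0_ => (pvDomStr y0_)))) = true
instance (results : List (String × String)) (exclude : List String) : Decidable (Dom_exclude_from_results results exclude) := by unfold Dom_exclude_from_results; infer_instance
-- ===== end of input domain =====

-- B replaces A's per-exclusion list rebuilds by a two-stage mask-and-select (objective: alternative decomposition).

-- ===== PORT A =====
-- for exclusion in exclude: rebuild results keeping entries whose lowered key does not contain exclusion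
def exclude_from_results (results : List (String × String)) (exclude : List String) : List (String × String) :=
  exclude.foldl
    (fun results exclusion =>
      results.foldl
        (fun new_results result =>
          if PySem.Str.isIn exclusion (PySem.Str.lower result.1) then new_results
          else new_results ++ [result])
        [])
    results

-- ===== PORT B =====
-- bad = [any(e in r[0].lower() for e in exclude) for r in results]; return [r for r, b in zip(results, bad) if not b]
def exclude_from_results_alt (results : List (String × String)) (exclude : List String) : List (String × String) :=
  let bad := results.map (fun r => exclude.any (fun e => PySem.Str.isIn e (PySem.Str.lower r.1)))
  ((results.zip bad).filter (fun p => !p.2)).map Prod.fst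

-- ===== PRECONDITION & SPEC =====
def Spec_exclude_from_results (results : List (String × String)) (exclude : List String) (out : List (String × String)) : Prop := out = exclude_from_results_alt results exclude
instance (results : List (String × String)) (exclude : List String) (out : List (String × String)) : Decidable (Spec_exclude_from_results results exclude out) := by unfold Spec_exclude_from_results; infer_instance

-- ===== CLAIM (what is proved, stated in full; the proofs are below) =====
def Claim_equal_exclude_from_results : Prop := ∀ (results : List (String × String)) (exclude : List String), Dom_exclude_from_results results exclude → Spec_exclude_from_results results exclude (exclude_from_results results exclude)

-- ===== LEMMAS AND PROOFS =====

-- selecting by a mask computed from f is filtering by f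
theorem zip_mask_select {α : Type} (xs : List α) (f : α → Bool) :
    ((xs.zip (xs.map f)).filter (fun p => !p.2)).map Prod.fst
      = xs.filter (fun x => !f x) := by
  induction xs with
  | nil => simp
  | cons x xs ih =>
    by_cases h : f x = true <;> simp [List.zip_cons_cons, List.filter, h, ih]

-- one pass of A's inner loop is a filter
theorem exclude_inner_pass (results : List (String × String)) (exclusion : String) :
    results.foldl
      (fun new_results result =>
        if PySem.Str.isIn exclusion (PySem.Str.lower result.1) then new_results
        else new_results ++ [result])
      []
    = results.filter (fun r => !PySem.Str.isIn exclusion (PySem.Str.lower r.1)) := by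
  have h1 := PySem.List.foldl_congr_mem
    (l := results) (init := ([] : List (String × String)))
    (f := fun new_results result =>
        if PySem.Str.isIn exclusion (PySem.Str.lower result.1) then new_results
        else new_results ++ [result])
    (g := fun new_results result =>
        if !PySem.Str.isIn exclusion (PySem.Str.lower result.1) then new_results ++ [result]
        else new_results)
    (by intro acc x _
        by_cases h : PySem.Chars.isIn exclusion.toList (PySem.Chars.lower x.1.toList) = true <;>
          simp [PySem.Str.isIn, PySem.Str.lower, h])
  rw [h1, PySem.List.foldl_append_if_eq_filter]
  simp

-- A's fold of filters equals the single filter of B's mask predicate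
theorem exclude_fold_eq (exclude : List String) (results : List (String × String)) :
    exclude_from_results results exclude
      = results.filter (fun r => !(exclude.any (fun e => PySem.Str.isIn e (PySem.Str.lower r.1)))) := by
  induction exclude generalizing results with
  | nil => simp [exclude_from_results]
  | cons e es ih =>
    simp only [exclude_from_results, List.foldl_cons] at *
    rw [exclude_inner_pass, ih, List.filter_filter]
    apply List.filter_congr
    intro r _
    simp [Bool.and_comm]

-- ===== VERDICT (by name: the statement is the Claim_ definition above) =====
theorem exclude_from_results_spec : Claim_equal_exclude_from_results := by
  intro results exclude _
  show _ = _
  rw [exclude_from_results_alt, zip_mask_select, exclude_fold_eq]
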